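-- pv_equiv track=rewrite | github.com/mijahauan/sigmond | lib/sigmond/tui/screens/cpu_affinity.py | _governor_summary
-- ===== SOURCE A (Python) =====
-- def _governor_summary(governors: dict) -> str:
--     """Return e.g. 'schedutil (16/16)' or 'performance (8/16), powersave (8/16)'."""
--     if not governors:
--         return "(no cpufreq sysfs)"
--     total = len(governors)
--     counts: dict = {}
--     for gov in governors.values():
--         counts[gov] = counts.get(gov, 0) + 1
--     parts = [f"{gov} ({n}/{total})" for gov, n in sorted(counts.items())]
--     return ", ".join(parts)
-- ===== SOURCE B (Python) =====
-- def _governor_summary(governors: dict) -> str: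
--     """Return e.g. 'schedutil (16/16)' or 'performance (8/16), powersave (8/16)'."""
--     vals = sorted(governors.values())
--     if not vals:
--         return "(no cpufreq sysfs)"
--     total = len(vals)
--     parts = []
--     i = 0
--     while i < len(vals):
--         j = i
--         while j < len(vals) and vals[j] == vals[i]:
--             j += 1
--         parts.append(f"{vals[i]} ({j - i}/{total})")
--         i = j
--     return ", ".join(parts)
-- ===== Notes on version B (the rewrite author's own statement) =====
-- stated objective: alternative
-- what changed: A counts values into a dict and sorts the distinct (name, count) items; B sorts the raw governor values once and emits the parts in a single run-length scan over adjacent equal names, with no counting dict at all.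
import Mathlib
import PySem

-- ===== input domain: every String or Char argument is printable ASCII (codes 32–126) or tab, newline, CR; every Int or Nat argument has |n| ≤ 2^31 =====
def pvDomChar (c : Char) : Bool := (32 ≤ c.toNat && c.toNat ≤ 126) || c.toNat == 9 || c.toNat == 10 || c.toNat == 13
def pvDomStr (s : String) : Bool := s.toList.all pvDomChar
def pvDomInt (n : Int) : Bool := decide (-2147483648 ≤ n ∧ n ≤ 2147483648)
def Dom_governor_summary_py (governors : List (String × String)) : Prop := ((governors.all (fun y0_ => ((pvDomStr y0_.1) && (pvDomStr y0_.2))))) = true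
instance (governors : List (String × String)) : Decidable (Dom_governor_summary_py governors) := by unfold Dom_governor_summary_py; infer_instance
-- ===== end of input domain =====

-- B replaces A's count-into-dict-then-sort-keys pass by sorting the raw governor values once and
-- run-length grouping adjacent equal names in a single scan (objective: alternative decomposition).

-- ===== PORT A =====
-- the dict[str,str] parameter arrives as an association list; Python dict construction = PySem.Dict.ofList
def governor_summary_py (governors : List (String × String)) : String :=
  let d := PySem.Dict.ofList governors
  if d.items.isEmpty then "(no cpufreq sysfs)"        -- if not governors
  else
    let total : Int := d.size                          -- total = len(governors)
    -- for gov in governors.values(): counts[gov] = counts.get(gov, 0) + 1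
    let counts := d.values.foldl (fun c g => c.insert g (c.getD g 0 + 1)) PySem.Dict.empty
    -- sorted(counts.items()): dict keys are distinct, so Python's tuple sort = stable sort by the key
    let parts := (PySem.List.sorted counts.items (fun p => p.1) false).map
      (fun p => p.1 ++ " (" ++ PySem.Int.toStr p.2 ++ "/" ++ PySem.Int.toStr total ++ ")")
    PySem.Str.join ", " parts

-- ===== PORT B =====
-- the run-length scan of Source B's while loops: each step consumes one maximal run of equal adjacent values
def rleB (l : List String) : List (String × Int) :=
  match l with
  | [] => []
  | x :: xs =>
      (x, ((xs.takeWhile (fun y => y == x)).length : Int) + 1) :: rleB (xs.dropWhile (fun y => y == x))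
termination_by l.length
decreasing_by
  simp only [List.length_cons]
  exact Nat.lt_succ_of_le (List.dropWhile_sublist _).length_le

def governor_summary_py_alt (governors : List (String × String)) : String :=
  let vals := PySem.List.sorted (PySem.Dict.ofList governors).values (fun x => x) false
  if vals.isEmpty then "(no cpufreq sysfs)"
  else
    let total : Int := vals.length
    PySem.Str.join ", " ((rleB vals).map
      (fun p => p.1 ++ " (" ++ PySem.Int.toStr p.2 ++ "/" ++ PySem.Int.toStr total ++ ")"))

-- ===== PRECONDITION & SPEC =====
def Spec_governor_summary_py (governors : List (String × String)) (out : String) : Prop := out = governor_summary_py_alt governors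
instance (governors : List (String × String)) (out : String) : Decidable (Spec_governor_summary_py governors out) := by unfold Spec_governor_summary_py; infer_instance

-- ===== CLAIM (what is proved, stated in full; the proofs are below) =====
def Claim_equal_governor_summary_py : Prop := ∀ (governors : List (String × String)), Dom_governor_summary_py governors → Spec_governor_summary_py governors (governor_summary_py governors)

-- ===== LEMMAS AND PROOFS =====

-- x does not survive dropping its own run from a ≤-sorted list whose elements all dominate x.
theorem not_mem_dropWhile_beq (x : String) (xs : List String) (hx : ∀ y ∈ xs, x ≤ y)
    (hxs : xs.Pairwise (· ≤ ·)) : x ∉ xs.dropWhile (fun y => y == x) := by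
  intro hmem
  cases hdx : xs.dropWhile (fun y => y == x) with
  | nil => rw [hdx] at hmem; simp at hmem
  | cons a rest =>
    have ha : ¬ ((a == x) = true) := by
      have := List.head?_dropWhile_not (fun y => y == x) xs
      rw [hdx] at this; simpa using this
    have hax : a ≠ x := by simpa using ha
    have hasub : a ∈ xs := (List.dropWhile_sublist _).mem (by rw [hdx]; exact List.mem_cons_self)
    have hxa : x ≤ a := hx a hasub
    rw [hdx] at hmem
    rcases List.mem_cons.mp hmem with h | h
    · exact hax h.symm
    · have hpw : (a :: rest).Pairwise (· ≤ ·) := by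
        rw [← hdx]; exact hxs.sublist (List.dropWhile_sublist _)
      have : a ≤ x := (List.pairwise_cons.mp hpw).1 x h
      exact hax (le_antisymm this hxa)

-- On a ≤-sorted list, membership in the run-length encoding is "a distinct value with its count".
theorem mem_rleB (l : List String) (h : l.Pairwise (· ≤ ·)) (p : String × Int) :
    p ∈ rleB l ↔ p.1 ∈ l ∧ p.2 = (l.count p.1 : Int) := by
  induction l using rleB.induct with
  | case1 => simp [rleB]
  | case2 x xs ih =>
    rw [List.pairwise_cons] at h
    obtain ⟨hx, hxs⟩ := h
    set t := xs.takeWhile (fun y => y == x) with ht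
    set dxs := xs.dropWhile (fun y => y == x) with hd
    have hre : rleB (x :: xs) = (x, (t.length : Int) + 1) :: rleB dxs := by rw [rleB]
    have htd : t ++ dxs = xs := List.takeWhile_append_dropWhile
    have hmt : ∀ y ∈ t, y = x := by
      intro y hy; have := List.mem_takeWhile_imp hy; simpa using this
    have hnd : x ∉ dxs := not_mem_dropWhile_beq x xs hx hxs
    have hdpw : dxs.Pairwise (· ≤ ·) := hxs.sublist (List.dropWhile_sublist _)
    have ih' := ih hdpw
    have hcx : (x :: xs).count x = t.length + 1 := by
      have h1 : t.count x = t.length := List.count_eq_length.mpr (by intro b hb; exact (hmt b hb).symm)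
      have h2 : dxs.count x = 0 := List.count_eq_zero.mpr hnd
      rw [← htd]
      simp [h1, h2]
    rw [hre]
    by_cases hp : p.1 = x
    · constructor
      · intro hmem
        rcases List.mem_cons.mp hmem with h | h
        · rw [h]; exact ⟨by simp, by simp [hcx]⟩
        · exact absurd (((ih' ).mp h).1) (by rw [hp]; exact hnd)
      · rintro ⟨-, hcount⟩
        apply List.mem_cons.mpr; left
        have hpp : p = (p.1, p.2) := rfl
        rw [hpp, hp]
        rw [hp, hcx] at hcount
        rw [hcount]
        push_cast; ring_nf
    · have hxne : ¬ x = p.1 := fun h => hp h.symm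
      have hmem_iff : p.1 ∈ x :: xs ↔ p.1 ∈ dxs := by
        constructor
        · intro hm
          rcases List.mem_cons.mp hm with h | h
          · exact absurd h hp
          · rw [← htd] at h
            rcases List.mem_append.mp h with h | h
            · exact absurd (hmt _ h) hp
            · exact h
        · intro hm; exact List.mem_cons.mpr (Or.inr (by rw [← htd]; exact List.mem_append.mpr (Or.inr hm)))
      have hcnt : (x :: xs).count p.1 = dxs.count p.1 := by
        have h1 : t.count p.1 = 0 := List.count_eq_zero.mpr (fun hm => hp (hmt _ hm))
        rw [← htd]
        simp [h1, hxne]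
      constructor
      · intro hmem
        rcases List.mem_cons.mp hmem with h | h
        · exact absurd (congrArg Prod.fst h) hp
        · obtain ⟨hm, hc⟩ := ih'.mp h
          exact ⟨hmem_iff.mpr hm, by rw [hcnt]; exact hc⟩
      · rintro ⟨hm, hc⟩
        exact List.mem_cons.mpr (Or.inr (ih'.mpr ⟨hmem_iff.mp hm, by rw [hcnt] at hc; exact hc⟩))

-- The run-length encoding of a ≤-sorted list has strictly increasing first components.
theorem pairwise_rleB (l : List String) (h : l.Pairwise (· ≤ ·)) :
    (rleB l).Pairwise (fun a b => a.1 < b.1) := by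
  induction l using rleB.induct with
  | case1 => simp [rleB]
  | case2 x xs ih =>
    rw [List.pairwise_cons] at h
    obtain ⟨hx, hxs⟩ := h
    set dxs := xs.dropWhile (fun y => y == x) with hd
    have hre : rleB (x :: xs) = (x, ((xs.takeWhile (fun y => y == x)).length : Int) + 1) :: rleB dxs := by rw [rleB]
    have hnd : x ∉ dxs := not_mem_dropWhile_beq x xs hx hxs
    have hdpw : dxs.Pairwise (· ≤ ·) := hxs.sublist (List.dropWhile_sublist _)
    rw [hre, List.pairwise_cons]
    refine ⟨?_, ih hdpw⟩
    intro q hq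
    have hq1 : q.1 ∈ dxs := ((mem_rleB dxs hdpw q).mp hq).1
    have hq1xs : q.1 ∈ xs := (List.dropWhile_sublist _).mem hq1
    exact lt_of_le_of_ne (hx _ hq1xs) (fun h => hnd (show x ∈ dxs from (show x = q.1 from h) ▸ hq1))

-- The central equation: A's sorted counter items = B's run-length groups of the sorted values.
theorem sorted_counter_eq_rleB (vals : List String) :
    PySem.List.sorted (PySem.Dict.counter vals).items (fun p => p.1) false
      = rleB (PySem.List.sorted vals (fun x => x) false) := by
  set s := PySem.List.sorted vals (fun x => x) false with hsdef
  have hs : s.Pairwise (· ≤ ·) := by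
    have := PySem.List.sorted_pairwise (xs := vals) (key := fun x => x)
    simpa using this
  have hsperm : s.Perm vals := PySem.List.sorted_perm vals (fun x => x) false
  apply PySem.List.sorted_eq_of_perm_of_pairwise_lt
  · rw [PySem.Dict.items_counter]
    apply (List.perm_ext_iff_of_nodup ?_ ?_).mpr
    · intro a
      rw [mem_rleB s hs a]
      constructor
      · rintro ⟨hm, hc⟩
        simp only [List.mem_map]
        refine ⟨a.1, ?_, ?_⟩
        · rw [PySem.Set.mem_ofList]; exact hsperm.mem_iff.mp hm
        · rw [← hsperm.count_eq] at *
          exact Prod.ext rfl hc.symm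
      · intro hm
        simp only [List.mem_map] at hm
        obtain ⟨k, hk, hka⟩ := hm
        rw [PySem.Set.mem_ofList] at hk
        rw [← hka]
        exact ⟨hsperm.mem_iff.mpr hk, by rw [hsperm.count_eq]⟩
    · exact (pairwise_rleB s hs).imp (fun {a b} hlt => fun heq => absurd (heq ▸ hlt) (lt_irrefl _))
    · exact ((PySem.Set.nodup_ofList vals).map (fun a b h => congrArg Prod.fst h))
  · exact pairwise_rleB s hs

-- Putting it together: guards, totals and the part lists of the two ports agree.
theorem main_eq (governors : List (String × String)) :
    governor_summary_py governors = governor_summary_py_alt governors := by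
  unfold governor_summary_py governor_summary_py_alt
  dsimp only
  have hguard : (PySem.List.sorted (PySem.Dict.ofList governors).values (fun x => x) false).isEmpty
      = (PySem.Dict.ofList governors).items.isEmpty := by
    rcases h : (PySem.Dict.ofList governors).items with _ | ⟨a, rest⟩
    · simp [PySem.Dict.values, h, PySem.List.sorted_eq_nil_iff]
    · simp [PySem.Dict.values, h, PySem.List.sorted_eq_nil_iff]
  rw [hguard]
  by_cases hemp : (PySem.Dict.ofList governors).items.isEmpty
  · simp [hemp]
  · simp only [hemp, Bool.false_eq_true, if_neg, not_false_eq_true]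
    rw [PySem.Dict.foldl_insert_getD_add_one_eq_counter, sorted_counter_eq_rleB]
    have htot : ((PySem.Dict.ofList governors).size : Int)
        = (((PySem.List.sorted (PySem.Dict.ofList governors).values (fun x => x) false)).length : Int) := by
      simp [PySem.List.length_sorted, PySem.Dict.size, PySem.Dict.values]
    rw [htot]

-- ===== VERDICT (by name: the statement is the Claim_ definition above) =====
theorem governor_summary_py_spec : Claim_equal_governor_summary_py := by
  intro governors _
  unfold Spec_governor_summary_py
  exact main_eq governors
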